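-- pv_equiv track=rewrite | github.com/EverybodyHops/Apriori | apriori.py | dfs_record
-- ===== SOURCE A (Python) =====
-- import copy
--
-- def dfs_record(record, depth):
--     def dfs(record, now, depth, temp, ret):
--         if depth == 0:
--             ret.append(tuple(copy.deepcopy(temp)))
--         else:
--             for i in range(now, len(record)):
--                 temp.append(record[i])
--                 dfs(record, i + 1, depth - 1, temp, ret)
--                 temp.pop()
--     ret = []
--     dfs(record, 0, depth, [], ret)
--     return ret
-- ===== SOURCE B (Python) =====
-- import copy
--
-- def dfs_record(record, depth):
--     if depth < 0:
--         return []
--     def combos(lst, d):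
--         if d == 0:
--             return [()]
--         if len(lst) < d:
--             return []
--         head, tail = lst[0], lst[1:]
--         return [(copy.deepcopy(head),) + c for c in combos(tail, d - 1)] + combos(tail, d)
--     return combos(record, depth)
-- ===== Notes on version B (the rewrite author's own statement) =====
-- stated objective: alternative
-- what changed: Replaces A's index-based DFS with a shared mutable temp/ret accumulator (n-ary loop over start positions with append/pop backtracking) by a pure include/exclude structural recursion on the list head that builds each result list by prefixing, with a length-based pruning cut.
import Mathlib
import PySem

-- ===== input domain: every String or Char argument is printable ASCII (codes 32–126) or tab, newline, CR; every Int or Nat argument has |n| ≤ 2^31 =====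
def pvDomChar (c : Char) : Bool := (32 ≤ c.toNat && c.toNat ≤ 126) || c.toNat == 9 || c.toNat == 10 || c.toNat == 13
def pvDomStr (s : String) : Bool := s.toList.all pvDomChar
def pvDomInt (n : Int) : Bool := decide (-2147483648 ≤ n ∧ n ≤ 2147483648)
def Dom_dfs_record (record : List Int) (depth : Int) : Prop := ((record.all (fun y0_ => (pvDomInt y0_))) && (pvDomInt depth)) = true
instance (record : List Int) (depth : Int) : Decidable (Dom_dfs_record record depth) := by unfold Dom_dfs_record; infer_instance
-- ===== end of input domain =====

-- B replaces A's backtracking DFS (loop over start positions, shared temp/ret) by a pure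
-- include/exclude recursion on the list head; same return value, no speed claim.

-- ===== PORT A =====
-- A's inner `dfs` (the depth==0 test, else the `for i in range(now, len(record))` loop with
-- temp.append / recursive call / temp.pop): runA carries `k`, the loop's remaining iteration
-- count (k = len(record) - now at every call), so the recursion is structural; temp and ret are
-- threaded functionally, the pop is the fact that temp is passed extended only to the inner call.
def runA (record : List Int) (k : Nat) (now : Nat) (depth : Int) (temp : List Int)
    (ret : List (List Int)) : List (List Int) :=
  if depth = 0 then ret ++ [temp]
  else
    match k with
    | 0 => ret
    | Nat.succ k' =>
        runA record k' (now + 1) depth temp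
          (runA record k' (now + 1) (depth - 1) (temp ++ [record.getD now 0]) ret)

def dfs_record (record : List Int) (depth : Int) : List (List Int) :=
  runA record (record.length - 0) 0 depth [] []

-- ===== PORT B =====
-- B's inner `combos(lst, d)`: include/exclude recursion on the head with a length cut.
def combosB (lst : List Int) (d : Nat) : List (List Int) :=
  if d = 0 then [[]]
  else if lst.length < d then []
  else
    match lst with
    | [] => []
    | x :: xs => (combosB xs (d - 1)).map (fun c => x :: c) ++ combosB xs d
termination_by lst.length
decreasing_by all_goals simp

def dfs_record_alt (record : List Int) (depth : Int) : List (List Int) :=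
  if depth < 0 then [] else combosB record depth.toNat

-- ===== PRECONDITION & SPEC =====
def Spec_dfs_record (record : List Int) (depth : Int) (out : List (List Int)) : Prop := out = dfs_record_alt record depth
instance (record : List Int) (depth : Int) (out : List (List Int)) : Decidable (Spec_dfs_record record depth out) := by unfold Spec_dfs_record; infer_instance

-- ===== CLAIM (what is proved, stated in full; the proofs are below) =====
def Claim_equal_dfs_record : Prop := ∀ (record : List Int) (depth : Int), Dom_dfs_record record depth → Spec_dfs_record record depth (dfs_record record depth)

-- ===== LEMMAS AND PROOFS =====

-- What A's loop produces from the suffix it still scans (proof-only characterisation).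
def outLoop (depth : Int) : List Int → List (List Int)
  | [] => []
  | x :: xs =>
      ((if depth - 1 = 0 then [[]] else outLoop (depth - 1) xs)).map (fun c => x :: c)
        ++ outLoop depth xs

def outI (depth : Int) (xs : List Int) : List (List Int) :=
  if depth = 0 then [[]] else outLoop depth xs

theorem runA_spec (record : List Int) :
    ∀ (k now : Nat) (depth : Int) (temp : List Int) (ret : List (List Int)),
      k = record.length - now → now ≤ record.length →
      runA record k now depth temp ret
        = ret ++ (outI depth (record.drop now)).map (fun c => temp ++ c) := by
  intro k
  induction k with
  | zero =>
    intro now depth temp ret hk hle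
    have hnow : now = record.length := by omega
    rw [runA]
    by_cases h0 : depth = 0
    · simp [h0, outI]
    · simp [h0, outI, List.drop_eq_nil_of_le (le_of_eq hnow.symm), outLoop]
  | succ k ih =>
    intro now depth temp ret hk hle
    rw [runA]
    by_cases h0 : depth = 0
    · simp [h0, outI]
    · have hlt : now < record.length := by omega
      have hdrop : record.drop now = record[now] :: record.drop (now + 1) :=
        List.drop_eq_getElem_cons hlt
      have hx : record.getD now 0 = record[now] := List.getD_eq_getElem record 0 hlt
      rw [ih (now + 1) (depth - 1) (temp ++ [record.getD now 0]) ret (by omega) (by omega),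
        ih (now + 1) depth temp _ (by omega) (by omega), hdrop, hx]
      have houter : outI depth (record.drop (now + 1)) = outLoop depth (record.drop (now + 1)) := by
        rw [outI, if_neg h0]
      rw [houter]
      simp [h0, outI, outLoop, List.map_map, Function.comp, List.append_assoc]

theorem outLoop_neg : ∀ (xs : List Int) (depth : Int), depth < 0 → outLoop depth xs = [] := by
  intro xs
  induction xs with
  | nil => intro depth _; rfl
  | cons x xs ih =>
    intro depth hd
    have h1 : depth - 1 ≠ 0 := by omega
    simp [outLoop, h1, ih (depth - 1) (by omega), ih depth hd]

theorem combosB_short (xs : List Int) (d : Nat) (h : xs.length < d) : combosB xs d = [] := by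
  cases d with
  | zero => omega
  | succ d => rw [combosB.eq_def]; simp [h]

theorem outI_eq_combosB : ∀ (xs : List Int) (d : Nat), outI (d : Int) xs = combosB xs d := by
  intro xs
  induction xs with
  | nil =>
    intro d
    cases d with
    | zero => rw [combosB.eq_def]; simp [outI]
    | succ d =>
      have h0 : ((d + 1 : Nat) : Int) ≠ 0 := by push_cast; omega
      rw [combosB.eq_def, outI, if_neg h0]
      simp [outLoop]
  | cons x xs ih =>
    intro d
    cases d with
    | zero => rw [combosB.eq_def]; simp [outI]
    | succ d =>
      have h0 : ((d + 1 : Nat) : Int) ≠ 0 := by push_cast; omega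
      have hc : ((d + 1 : Nat) : Int) - 1 = (d : Int) := by push_cast; ring
      have lhs_eq : outI ((d + 1 : Nat) : Int) (x :: xs)
          = (combosB xs d).map (fun c => x :: c) ++ combosB xs (d + 1) := by
        rw [outI, if_neg h0, outLoop, hc]
        have h1 : (if (d : Int) = 0 then [[]] else outLoop (d : Int) xs) = outI (d : Int) xs := by
          rw [outI]
        rw [h1, ih d]
        rw [show outLoop ((d + 1 : Nat) : Int) xs = outI ((d + 1 : Nat) : Int) xs from
            (by rw [outI, if_neg h0]), ih (d + 1)]
      have rhs_eq : combosB (x :: xs) (d + 1)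
          = (combosB xs d).map (fun c => x :: c) ++ combosB xs (d + 1) := by
        by_cases hlen : (x :: xs).length < d + 1
        · have h1 : xs.length < d := by simp at hlen; omega
          rw [combosB_short (x :: xs) (d + 1) hlen, combosB_short xs d h1,
            combosB_short xs (d + 1) (by omega)]
          simp
        · conv_lhs => rw [combosB.eq_def]
          simp only [List.length_cons, Nat.not_lt] at hlen
          simp
          intro h1
          omega
      rw [lhs_eq, rhs_eq]

theorem outI_eq_alt (record : List Int) (depth : Int) :
    outI depth record = dfs_record_alt record depth := by
  by_cases hneg : depth < 0
  · have h0 : depth ≠ 0 := by omega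
    rw [dfs_record_alt, if_pos hneg, outI, if_neg h0, outLoop_neg record depth hneg]
  · have hto : ((depth.toNat : Nat) : Int) = depth := Int.toNat_of_nonneg (by omega)
    rw [dfs_record_alt, if_neg hneg]
    calc outI depth record = outI ((depth.toNat : Nat) : Int) record := by rw [hto]
      _ = combosB record depth.toNat := outI_eq_combosB record depth.toNat

-- ===== VERDICT (by name: the statement is the Claim_ definition above) =====
theorem dfs_record_spec : Claim_equal_dfs_record := by
  intro record depth _
  show dfs_record record depth = dfs_record_alt record depth
  have h := runA_spec record (record.length - 0) 0 depth [] [] rfl (by omega)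
  simpa [dfs_record, outI_eq_alt] using h
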